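-- pv_equiv track=rewrite | github.com/google/paranoid_crypto | paranoid_crypto/lib/randomness_tests/lattice_suite.py | PseudoAverage
-- ===== SOURCE A (Python) =====
-- def PseudoAverage(a: list[int], n: int) -> int:
--   """Finds a integer that is "closest" to a modulo n.
--
--   The goal of this function is to define some sort of average
--   for residues modulo n. For example if n = 10 and a =
--   [0, 6, 7, 8, 9] then the result should be 8, since this one
--   0 == 10 (mod 10) and the integers 6, 7, 8, 9, 10 are close to
--   each other.
--
--   This function does essentially the following:
--   From each pair (a[i], a[i] + n) an element b[i] is selected,
--   such that the variance of the elements b[i] is minimal.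
--   The result is then the mean of the elements b[i] modulo n.
--
--   Args:
--     a: a list of integers
--     n: the modulus
--
--   Returns:
--     an integer close to all elements of a modulo n (as defined above).
--   """
--   a = sorted(a)
--   sum_a = sum(a)
--   m = len(a)
--   best_j = 0
--   best_diff = 0
--   const_j = n * m - 2 * sum_a
--   sx = 0
--   for i in range(m):
--     j = i + 1
--     # sx = sum(a[k] for k in range(j))
--     sx += a[i]
--     # Let b = [a[0] + n, ... a[i] + n, a[i+1], ... a[m-1]],
--     # i.e. b is the list a with the first j elements incremented by n.
--     # Then diff = (Variance(b) - Variance(a)) * (m - 1) / n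
--     diff = 2 * sx * m + j * (const_j - j * n)
--     if diff < best_diff:
--       best_j, best_diff = j, diff
--   pseudo_average = (sum_a + n * best_j + m // 2) // m % n
--   return pseudo_average
-- ===== SOURCE B (Python) =====
-- def PseudoAverage(a: list[int], n: int) -> int:
--   """Pseudo-average of residues modulo n.
--
--   Direct formulation: sort a; among the m+1 candidate lists
--   b_j = [a[0]+n, ..., a[j-1]+n, a[j], ..., a[m-1]] pick the smallest j
--   whose b_j has minimal variance (the integer metric
--   m*sum(x*x) - sum(x)**2 is m*(m-1) times the sample variance), then
--   return the rounded mean of that b_j modulo n.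
--   """
--   a = sorted(a)
--   m = len(a)
--   sum_a = sum(a)
--
--   def metric(j):
--     b = [x + n for x in a[:j]] + a[j:]
--     return m * sum(x * x for x in b) - sum(b) ** 2
--
--   best_j = 0
--   best_v = metric(0)
--   for j in range(1, m + 1):
--     v = metric(j)
--     if v < best_v:
--       best_j, best_v = j, v
--   return (sum_a + n * best_j + m // 2) // m % n
-- ===== Notes on version B (the rewrite author's own statement) =====
-- stated objective: alternative
-- what changed: Replaces A's incremental delta trick (running prefix sum sx and an algebraically pre-simplified diff) by a direct formulation: for each split j rebuild the candidate list b_j = [x+n for first j] + rest and compare the integer variance metric m*sum(x*x)-sum(x)**2 of the whole list, keeping the smallest minimizing j.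
-- outside the precondition, e.g. on PseudoAverage([0, 15], -2): A returns -1, B returns 0; on PseudoAverage([1, 2], 0): A raises ZeroDivisionError, B raises ZeroDivisionError
import Mathlib
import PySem

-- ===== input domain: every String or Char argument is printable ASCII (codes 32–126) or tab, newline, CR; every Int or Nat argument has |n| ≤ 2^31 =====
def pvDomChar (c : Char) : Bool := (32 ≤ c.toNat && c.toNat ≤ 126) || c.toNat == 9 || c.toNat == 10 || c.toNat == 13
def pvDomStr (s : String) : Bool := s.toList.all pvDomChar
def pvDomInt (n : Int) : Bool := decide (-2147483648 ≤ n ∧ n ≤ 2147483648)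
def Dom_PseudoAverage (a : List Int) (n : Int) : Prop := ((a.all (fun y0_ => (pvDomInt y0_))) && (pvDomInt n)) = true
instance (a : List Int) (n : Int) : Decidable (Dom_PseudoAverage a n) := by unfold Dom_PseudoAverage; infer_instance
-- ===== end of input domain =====

-- B replaces A's incremental delta trick by directly rebuilding each candidate list and
-- comparing its full integer variance metric (alternative decomposition, not faster).

-- ===== PORT A =====
def PseudoAverage (a : List Int) (n : Int) : Int :=
  let a := PySem.List.sorted a id false
  let sum_a := a.sum
  let m := a.length
  let const_j := n * (m : Int) - 2 * sum_a
  -- for i in range(m): sx += a[i]; diff = …; if diff < best_diff: best_j, best_diff = j, diff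
  let st := (PySem.List.pyRange 0 (m : Int) 1).foldl
    (fun (s : Int × Int × Int) i =>
      let j := i + 1
      let sx := s.2.2 + PySem.List.pyGetD a i 0
      let diff := 2 * sx * (m : Int) + j * (const_j - j * n)
      if diff < s.2.1 then (j, diff, sx) else (s.1, s.2.1, sx))
    (0, 0, 0)
  PySem.Int.mod (PySem.Int.floordiv (sum_a + n * st.1 + PySem.Int.floordiv (m : Int) 2) (m : Int)) n

-- ===== PORT B =====
-- metric(j): b = [x + n for x in a[:j]] + a[j:]; m*sum(x*x for x in b) - sum(b)**2
def pvMetric (a : List Int) (n : Int) (j : Int) : Int :=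
  let b := (PySem.List.slice a none (some j)).map (fun x => x + n) ++ PySem.List.slice a (some j) none
  (a.length : Int) * (b.map (fun x => x * x)).sum - (b.sum) ^ 2

def PseudoAverage_alt (a : List Int) (n : Int) : Int :=
  let a := PySem.List.sorted a id false
  let m := a.length
  let sum_a := a.sum
  -- best_j = 0; best_v = metric(0); for j in range(1, m+1): if metric(j) < best_v: update
  let st := (PySem.List.pyRange 1 ((m : Int) + 1) 1).foldl
    (fun (s : Int × Int) j =>
      let v := pvMetric a n j
      if v < s.2 then (j, v) else s)
    (0, pvMetric a n 0)
  PySem.Int.mod (PySem.Int.floordiv (sum_a + n * st.1 + PySem.Int.floordiv (m : Int) 2) (m : Int)) n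

-- ===== PRECONDITION & SPEC =====
-- Pre_ excludes a = [] and n = 0 (Python's final '// m % n' raises ZeroDivisionError there) and
-- n < 0, outside the natural domain of a modulus, where A's comparison direction (it ends up
-- maximizing the variance) is an artefact of its implementation.
def Pre_PseudoAverage (a : List Int) (n : Int) : Prop := a ≠ [] ∧ 0 < n
instance (a : List Int) (n : Int) : Decidable (Pre_PseudoAverage a n) := by unfold Pre_PseudoAverage; infer_instance
def pvWitness_PseudoAverage : List Int × Int := ([0, 6, 7, 8, 9], 10)

def Spec_PseudoAverage (a : List Int) (n : Int) (out : Int) : Prop := out = PseudoAverage_alt a n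
instance (a : List Int) (n : Int) (out : Int) : Decidable (Spec_PseudoAverage a n out) := by unfold Spec_PseudoAverage; infer_instance

-- ===== CLAIM (what is proved, stated in full; the proofs are below) =====
def Claim_equal_PseudoAverage : Prop := ∀ (a : List Int) (n : Int), Dom_PseudoAverage a n → Pre_PseudoAverage a n → Spec_PseudoAverage a n (PseudoAverage a n)

-- ===== LEMMAS AND PROOFS =====

-- sum of squares after shifting every element by n
lemma sq_sum_map_add (t : List Int) (n : Int) :
    ((t.map (fun x => x + n)).map (fun x => x * x)).sum
      = (t.map (fun x => x * x)).sum + 2 * n * t.sum + (t.length : Int) * n ^ 2 := by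
  induction t with
  | nil => simp
  | cons x t ih =>
      simp only [List.map_cons, List.sum_cons, List.length_cons, ih]
      push_cast; ring

-- sum after shifting every element by n
lemma sum_shift (t : List Int) (n : Int) :
    (t.map (fun x => x + n)).sum = t.sum + (t.length : Int) * n := by
  induction t with
  | nil => simp
  | cons x t ih =>
      simp only [List.map_cons, List.sum_cons, List.length_cons, ih]
      push_cast; ring

lemma metric_zero (s : List Int) (n : Int) :
    pvMetric s n 0 = (s.length : Int) * ((s.map (fun x => x * x)).sum) - s.sum ^ 2 := by
  unfold pvMetric
  rw [show (0 : Int) = ((0 : Nat) : Int) from rfl, PySem.List.slice_to_natCast,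
    PySem.List.slice_from_natCast]
  simp

-- the key algebraic identity: B's full metric at split k equals metric(0) plus n times A's diff
lemma metric_eq (s : List Int) (n : Int) (k : Nat) (hk : k ≤ s.length) :
    pvMetric s n (k : Int)
      = pvMetric s n 0
        + n * (2 * (s.take k).sum * (s.length : Int)
               + (k : Int) * ((n * (s.length : Int) - 2 * s.sum) - (k : Int) * n)) := by
  have h1 : ((s.take k).length : Int) = (k : Int) := by
    simp [List.length_take, Nat.min_eq_left hk]
  have h2 : (s.drop k).sum = s.sum - (s.take k).sum := by
    have := List.take_append_drop k s
    have : (s.take k).sum + (s.drop k).sum = s.sum := by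
      rw [← List.sum_append, List.take_append_drop]
    linarith
  have h3 : ((s.drop k).map (fun x => x * x)).sum
      = (s.map (fun x => x * x)).sum - ((s.take k).map (fun x => x * x)).sum := by
    have : ((s.take k).map (fun x => x * x)).sum + ((s.drop k).map (fun x => x * x)).sum
        = (s.map (fun x => x * x)).sum := by
      rw [← List.sum_append, ← List.map_append, List.take_append_drop]
    linarith
  rw [metric_zero]
  unfold pvMetric
  rw [PySem.List.slice_to_natCast, PySem.List.slice_from_natCast]
  simp only [List.map_append, List.sum_append, sq_sum_map_add, sum_shift, h1, h2, h3]
  ring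

lemma fold_eq (s : List Int) (n : Int) (hn : 0 < n) (k : Nat) (hk : k ≤ s.length) :
    let m := s.length
    let const_j := n * (m : Int) - 2 * s.sum
    let AS := (PySem.List.pyRange 0 (k : Int) 1).foldl
      (fun (st : Int × Int × Int) i =>
        let j := i + 1
        let sx := st.2.2 + PySem.List.pyGetD s i 0
        let diff := 2 * sx * (m : Int) + j * (const_j - j * n)
        if diff < st.2.1 then (j, diff, sx) else (st.1, st.2.1, sx))
      (0, 0, 0)
    let BS := (PySem.List.pyRange 1 ((k : Int) + 1) 1).foldl
      (fun (st : Int × Int) j =>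
        let v := pvMetric s n j
        if v < st.2 then (j, v) else st)
      (0, pvMetric s n 0)
    BS.1 = AS.1 ∧ BS.2 = pvMetric s n 0 + n * AS.2.1 ∧ AS.2.2 = (s.take k).sum := by
  induction k with
  | zero =>
      simp [PySem.List.pyRange_one_eq_nil]
  | succ k ih =>
      have hk' : k ≤ s.length := Nat.le_of_succ_le hk
      have hklt : k < s.length := hk
      obtain ⟨ih1, ih2, ih3⟩ := ih hk'
      simp only at ih1 ih2 ih3 ⊢
      have hcast : ((k + 1 : Nat) : Int) = (k : Int) + 1 := by push_cast; ring
      have hA : PySem.List.pyRange 0 ((k + 1 : Nat) : Int) 1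
          = PySem.List.pyRange 0 (k : Int) 1 ++ [(k : Int)] := by
        rw [hcast, PySem.List.pyRange_one_succ_right (by omega)]
      have hB : PySem.List.pyRange 1 (((k + 1 : Nat) : Int) + 1) 1
          = PySem.List.pyRange 1 ((k : Int) + 1) 1 ++ [(k : Int) + 1] := by
        rw [hcast, PySem.List.pyRange_one_succ_right (by omega)]
      rw [hA, hB, List.foldl_append, List.foldl_append]
      simp only [List.foldl_cons, List.foldl_nil]
      -- the element read at step k and the new prefix sum
      have hget : PySem.List.pyGetD s (k : Int) 0 = s[k] := by
        simp [PySem.List.pyGetD_natCast, List.getD_eq_getElem?_getD,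
          List.getElem?_eq_getElem hklt]
      have hsx : (s.take (k + 1)).sum = (s.take k).sum + s[k] :=
        List.sum_take_succ s k hklt
      -- B's freshly computed metric at split k+1, in terms of A's fresh diff
      have hv : pvMetric s n ((k : Int) + 1)
          = pvMetric s n 0
            + n * (2 * ((s.take k).sum + s[k]) * (s.length : Int)
                   + ((k : Int) + 1) * ((n * (s.length : Int) - 2 * s.sum) - ((k : Int) + 1) * n)) := by
        rw [← hcast, metric_eq s n (k + 1) hk, hsx, hcast]
      set T := (s.take k).sum with hT
      set D := 2 * (T + s[k]) * (s.length : Int)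
          + ((k : Int) + 1) * ((n * (s.length : Int) - 2 * s.sum) - ((k : Int) + 1) * n) with hD
      have hiff : (pvMetric s n ((k : Int) + 1)
            < ((PySem.List.pyRange 1 ((k : Int) + 1) 1).foldl
                (fun (st : Int × Int) j =>
                  if pvMetric s n j < st.2 then (j, pvMetric s n j) else st)
                (0, pvMetric s n 0)).2)
          ↔ (D < ((PySem.List.pyRange 0 (k : Int) 1).foldl
                (fun (st : Int × Int × Int) i =>
                  if 2 * (st.2.2 + PySem.List.pyGetD s i 0) * (s.length : Int)
                      + (i + 1) * ((n * (s.length : Int) - 2 * s.sum) - (i + 1) * n) < st.2.1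
                  then (i + 1,
                        2 * (st.2.2 + PySem.List.pyGetD s i 0) * (s.length : Int)
                          + (i + 1) * ((n * (s.length : Int) - 2 * s.sum) - (i + 1) * n),
                        st.2.2 + PySem.List.pyGetD s i 0)
                  else (st.1, st.2.1, st.2.2 + PySem.List.pyGetD s i 0))
                (0, 0, 0)).2.1) := by
        rw [hv, ih2]
        constructor
        · intro h
          have := (add_lt_add_iff_left (pvMetric s n 0)).1 h
          exact lt_of_mul_lt_mul_left this (le_of_lt hn)
        · intro h
          exact (add_lt_add_iff_left (pvMetric s n 0)).2 (mul_lt_mul_of_pos_left h hn)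
      rw [hget, ih3]
      by_cases hc : D < ((PySem.List.pyRange 0 (k : Int) 1).foldl
            (fun (st : Int × Int × Int) i =>
              if 2 * (st.2.2 + PySem.List.pyGetD s i 0) * (s.length : Int)
                  + (i + 1) * ((n * (s.length : Int) - 2 * s.sum) - (i + 1) * n) < st.2.1
              then (i + 1,
                    2 * (st.2.2 + PySem.List.pyGetD s i 0) * (s.length : Int)
                      + (i + 1) * ((n * (s.length : Int) - 2 * s.sum) - (i + 1) * n),
                    st.2.2 + PySem.List.pyGetD s i 0)
              else (st.1, st.2.1, st.2.2 + PySem.List.pyGetD s i 0))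
            (0, 0, 0)).2.1
      · rw [if_pos hc, if_pos (hiff.2 hc)]
        exact ⟨rfl, hv, hsx.symm⟩
      · rw [if_neg hc, if_neg (fun h => hc (hiff.1 h))]
        exact ⟨ih1, ih2, hsx.symm⟩

-- ===== VERDICT (by name: the statement is the Claim_ definition above) =====
theorem PseudoAverage_spec : Claim_equal_PseudoAverage := by
  intro a n _ hpre
  have h := fold_eq (PySem.List.sorted a id false) n hpre.2 (PySem.List.sorted a id false).length le_rfl
  simp only at h
  unfold Spec_PseudoAverage PseudoAverage PseudoAverage_alt
  simp only [h.1]
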